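-- pv_equiv track=rewrite | github.com/alexstrive/tiny-codes | gamma.py | gamma_decode
-- ===== SOURCE A (Python) =====
-- def gamma_decode(stream: str) -> list[int]:
--     """Decodes a gamma-encoded bit string into a list of integers."""
--
--     i = 0
--     decoded = []
--
--     while i < len(stream):
--         # Count leading zeros (unary length prefix)
--         zeros = 0
--         while i < len(stream) and stream[i] == "0":
--             zeros += 1
--             i += 1
--
--         if i >= len(stream):
--             raise ValueError("Malformed gamma stream (prefix cutoff)")
--
--         i += 1
--
--         # Read next 'zeros' bits as offset
--         if i + zeros > len(stream):
--             raise ValueError("Malformed gamma stream (offset cutoff)")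
--
--         offset = stream[i : i + zeros]
--         i += zeros
--
--         # Reconstruct the original number
--         binary = "1" + offset
--         decoded.append(int(binary, 2))
--
--     return decoded
-- ===== SOURCE B (Python) =====
-- def gamma_decode(stream: str) -> list[int]:
--     """Decodes a gamma-encoded bit string into a list of integers.
--
--     Single flat pass / state machine: a unary prefix of zeros is counted;
--     the terminator bit starts an accumulator at 1, which then absorbs the
--     next `zeros` offset bits arithmetically (value = value*2 + bit)."""
--
--     decoded = []
--     reading_offset = False
--     zeros = 0
--     remaining = 0
--     value = 0
--
--     for ch in stream:
--         if not reading_offset: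
--             if ch == "0":
--                 zeros += 1
--             else:
--                 value = 1
--                 remaining = zeros
--                 zeros = 0
--                 if remaining == 0:
--                     decoded.append(value)
--                 else:
--                     reading_offset = True
--         else:
--             if ch == "0":
--                 bit = 0
--             elif ch == "1":
--                 bit = 1
--             else:
--                 raise ValueError("Malformed gamma stream (non-binary offset bit)")
--             value = value * 2 + bit
--             remaining -= 1
--             if remaining == 0:
--                 decoded.append(value)
--                 reading_offset = False
--
--     if reading_offset:
--         raise ValueError("Malformed gamma stream (offset cutoff)")
--     if zeros:
--         raise ValueError("Malformed gamma stream (prefix cutoff)")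
--     return decoded
-- ===== Notes on version B (the rewrite author's own statement) =====
-- stated objective: faster
-- what changed: A's nested index loops with per-code string slicing and an int(binary,2) re-parse are replaced by a single flat state-machine pass (mode flag, zero count, remaining counter) that builds each value arithmetically bit by bit.
-- outside the precondition, e.g. on gamma_decode('001_0'): A returns [2], B raises ValueError
import Mathlib
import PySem

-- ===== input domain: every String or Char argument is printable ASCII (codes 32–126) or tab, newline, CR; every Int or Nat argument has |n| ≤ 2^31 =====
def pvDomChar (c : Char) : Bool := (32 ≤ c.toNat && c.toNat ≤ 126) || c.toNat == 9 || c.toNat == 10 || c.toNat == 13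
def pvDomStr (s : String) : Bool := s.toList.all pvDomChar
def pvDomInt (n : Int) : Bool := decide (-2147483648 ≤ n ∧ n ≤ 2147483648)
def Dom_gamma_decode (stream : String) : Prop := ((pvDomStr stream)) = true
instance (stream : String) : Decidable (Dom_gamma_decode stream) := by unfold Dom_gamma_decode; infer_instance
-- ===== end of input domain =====

-- B replaces A's nested index loops, slicing and int(…,2) re-parse by one flat
-- state-machine pass building each value arithmetically (measurably faster, same O(n)).

-- ===== PORT A =====
-- inner `while` loop of A: count the leading '0's, return (zeros, remaining suffix)
def pvA_countZeros : List Char → Int → Int × List Char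
  | [], z => (z, [])
  | c :: t, z => if c == '0' then pvA_countZeros t (z + 1) else (z, c :: t)

-- termination helper for the outer loop (cited by decreasing_by)
theorem pvA_countZeros_len_le : ∀ (cs : List Char) (z : Int),
    (pvA_countZeros cs z).2.length ≤ cs.length := by
  intro cs
  induction cs with
  | nil => intro z; simp [pvA_countZeros]
  | cons c t ih =>
    intro z
    simp only [pvA_countZeros]
    split
    · exact le_trans (ih (z + 1)) (by simp)
    · simp

def pvA_bit (c : Char) : Int := if c == '1' then 1 else 0

-- hand port of Python's int(s, 2) on the strings that can reach it here:
-- exact for strings over '0','1','_' (Python allows single underscores between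
-- digits); on any other character Python raises ValueError, modelled by `none`.
def pvA_int2go : List Char → Int → Option Int
  | [], acc => some acc
  | c :: t, acc =>
    if c == '0' || c == '1' then pvA_int2go t (acc * 2 + pvA_bit c)
    else if c == '_' then
      match t with
      | [] => none
      | c2 :: t2 =>
        if c2 == '0' || c2 == '1' then pvA_int2go t2 (acc * 2 + pvA_bit c2) else none
    else none

def pvA_int2? : List Char → Option Int
  | [] => none
  | c :: t => if c == '0' || c == '1' then pvA_int2go t (pvA_bit c) else none

-- outer `while i < len(stream)` loop of A, on the remaining suffix; the three
-- places where the Python raises ValueError return the accumulator (they lie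
-- outside Pre_gamma_decode, so nothing is claimed there)
def pvA_loop : List Char → List Int → List Int
  | [], decoded => decoded
  | c :: t, decoded =>
    let p := pvA_countZeros (c :: t) 0   -- (zeros, rest of the stream)
    if hrest : p.2 = [] then decoded  -- raise ValueError("Malformed gamma stream (prefix cutoff)")
    else
      let r := p.2.tail                -- suffix after the terminator bit (i += 1)
      if p.1.toNat > r.length then decoded  -- raise ValueError("… (offset cutoff)")
      else
        match pvA_int2? ('1' :: r.take p.1.toNat) with
        | none => decoded  -- int(binary, 2) raises ValueError
        | some v => pvA_loop (r.drop p.1.toNat) (decoded ++ [v])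
termination_by cs _ => cs.length
decreasing_by
  have hle := pvA_countZeros_len_le (c :: t) 0
  have hpos : 0 < (pvA_countZeros (c :: t) 0).2.length := List.length_pos_iff.mpr hrest
  simp only [List.length_drop, List.length_tail, List.length_cons] at *
  omega

def gamma_decode (stream : String) : List Int := pvA_loop stream.toList []

-- ===== PORT B =====
-- one step of B's state machine; state = (decoded, reading_offset, zeros, remaining, value).
-- In offset mode a character other than '0'/'1' makes the Python raise ValueError
-- (outside Pre_gamma_decode); the port carries bit 0 there.
def pvB_step (st : List Int × Bool × Int × Int × Int) (ch : Char) :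
    List Int × Bool × Int × Int × Int :=
  match st with
  | (decoded, reading_offset, zeros, remaining, value) =>
    if !reading_offset then
      if ch == '0' then (decoded, false, zeros + 1, remaining, value)
      else if zeros = 0 then (decoded ++ [1], false, 0, 0, 1)
      else (decoded, true, 0, zeros, 1)
    else
      let bit : Int := if ch == '0' then 0 else if ch == '1' then 1 else 0
      let v := value * 2 + bit
      if remaining - 1 = 0 then (decoded ++ [v], false, zeros, 0, v)
      else (decoded, true, zeros, remaining - 1, v)

-- final state; Python B raises ValueError if it ends mid-prefix or mid-offset
-- (outside Pre_gamma_decode); the port returns the decoded list in every case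
def gamma_decode_alt (stream : String) : List Int :=
  (stream.toList.foldl pvB_step ([], false, 0, 0, 0)).1

-- ===== PRECONDITION & SPEC =====
-- Pre_ admits exactly the well-formed gamma streams (repeatedly: a run of '0's, a
-- terminator character, then that many offset bits drawn from '0'/'1').  It excludes
-- the inputs on which A raises ValueError (prefix/offset cutoff, or int() failing)
-- and the accidental corner where A still RETURNS because Python's int() tolerates
-- '_' inside an offset — there B raises ValueError instead (see claim.json cites).
-- membership test for the grammar of well-formed gamma streams, read left to
-- right with two counters: '0'-run length still open, and offset bits still owed
def pvVG : List Char → Nat → Nat → Bool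
  | [], zeros, owe => decide (zeros = 0) && decide (owe = 0)
  | c :: t, zeros, owe =>
    if owe = 0 then
      if c == '0' then pvVG t (zeros + 1) 0 else pvVG t 0 zeros
    else (c == '0' || c == '1') && pvVG t zeros (owe - 1)

def Pre_gamma_decode (stream : String) : Prop := pvVG stream.toList 0 0 = true
instance (stream : String) : Decidable (Pre_gamma_decode stream) := by
  unfold Pre_gamma_decode; infer_instance

def pvWitness_gamma_decode : String := "00101"

def Spec_gamma_decode (stream : String) (out : List Int) : Prop := out = gamma_decode_alt stream
instance (stream : String) (out : List Int) : Decidable (Spec_gamma_decode stream out) := by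
  unfold Spec_gamma_decode; infer_instance

-- ===== CLAIM (what is proved, stated in full; the proofs are below) =====
def Claim_equal_gamma_decode : Prop := ∀ (stream : String), Dom_gamma_decode stream → Pre_gamma_decode stream → Spec_gamma_decode stream (gamma_decode stream)

-- ===== LEMMAS AND PROOFS =====

theorem pvA_countZeros_eq (cs : List Char) : ∀ z : Int,
    pvA_countZeros cs z = (z + ((cs.takeWhile (· == '0')).length : Int), cs.dropWhile (· == '0')) := by
  induction cs with
  | nil => intro z; simp [pvA_countZeros]
  | cons c t ih =>
    intro z
    by_cases hc : (c == '0') = true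
    · simp [pvA_countZeros, hc, List.takeWhile_cons, List.dropWhile_cons, ih]
      omega
    · simp [pvA_countZeros, hc, List.takeWhile_cons, List.dropWhile_cons]

theorem pvA_int2go_bin (off : List Char) : ∀ acc : Int,
    off.all (fun b => b == '0' || b == '1') = true →
    pvA_int2go off acc = some (off.foldl (fun v c => v * 2 + pvA_bit c) acc) := by
  induction off with
  | nil => intro acc _; simp [pvA_int2go]
  | cons c t ih =>
    intro acc hall
    simp only [List.all_cons, Bool.and_eq_true] at hall
    rw [List.foldl_cons]
    rcases Bool.or_eq_true_iff.mp hall.1 with h | h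
    · rw [beq_iff_eq] at h; subst h
      have hr : pvA_int2go ('0' :: t) acc = pvA_int2go t (acc * 2 + pvA_bit '0') := by
        rw [pvA_int2go.eq_def]; norm_num
      rw [hr]; exact ih _ hall.2
    · rw [beq_iff_eq] at h; subst h
      have hr : pvA_int2go ('1' :: t) acc = pvA_int2go t (acc * 2 + pvA_bit '1') := by
        rw [pvA_int2go.eq_def]; norm_num
      rw [hr]; exact ih _ hall.2

theorem pvA_int2_bin (off : List Char)
    (h : off.all (fun b => b == '0' || b == '1') = true) :
    pvA_int2? ('1' :: off) = some (off.foldl (fun v c => v * 2 + pvA_bit c) 1) := by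
  have hgo := pvA_int2go_bin off (pvA_bit '1') h
  have hunf : pvA_int2? ('1' :: off) = pvA_int2go off (pvA_bit '1') := by
    rw [pvA_int2?.eq_def]; norm_num
  rw [hunf, hgo]
  norm_num [pvA_bit]

-- how one step of B's machine acts, by mode
theorem pvB_step_zero (dec : List Int) (z rem v : Int) (c : Char) (h : (c == '0') = true) :
    pvB_step (dec, false, z, rem, v) c = (dec, false, z + 1, rem, v) := by
  simp only [pvB_step]; rw [if_pos (by simp), if_pos h]

theorem pvB_step_term (dec : List Int) (z rem v : Int) (c : Char) (h : (c == '0') = false) :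
    pvB_step (dec, false, z, rem, v) c =
      if z = 0 then (dec ++ [1], false, 0, 0, 1) else (dec, true, 0, z, 1) := by
  simp only [pvB_step]; rw [if_pos (by simp), if_neg (by simp [h])]

theorem pvB_step_off (dec : List Int) (z rem v : Int) (c : Char) :
    pvB_step (dec, true, z, rem, v) c =
      (if rem - 1 = 0 then
        (dec ++ [v * 2 + (if c == '0' then (0 : Int) else if c == '1' then 1 else 0)], false, z, 0,
          v * 2 + (if c == '0' then (0 : Int) else if c == '1' then 1 else 0))
      else (dec, true, z, rem - 1,
        v * 2 + (if c == '0' then (0 : Int) else if c == '1' then 1 else 0))) := by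
  simp only [pvB_step]; rw [if_neg (by simp)]

-- B swallows a run of '0's in prefix mode by incrementing `zeros`
theorem pvB_prefix (zs : List Char) : ∀ (cs : List Char) (dec : List Int) (z rem v : Int),
    zs.all (· == '0') = true →
    List.foldl pvB_step (dec, false, z, rem, v) (zs ++ cs) =
      List.foldl pvB_step (dec, false, z + (zs.length : Int), rem, v) cs := by
  induction zs with
  | nil => intro cs dec z rem v _; simp
  | cons c t ih =>
    intro cs dec z rem v hall
    simp only [List.all_cons, Bool.and_eq_true] at hall
    simp only [List.cons_append, List.foldl_cons]
    rw [pvB_step_zero _ _ _ _ _ hall.1, ih cs dec (z + 1) rem v hall.2, List.length_cons]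
    rw [show z + ((t.length + 1 : Nat) : Int) = z + 1 + (t.length : Int) by push_cast; ring]

-- B consumes a nonempty binary offset, appending the accumulated value
theorem pvB_offset (off : List Char) : ∀ (cs : List Char) (dec : List Int) (v : Int),
    off ≠ [] →
    off.all (fun b => b == '0' || b == '1') = true →
    List.foldl pvB_step (dec, true, 0, (off.length : Int), v) (off ++ cs) =
      List.foldl pvB_step
        (dec ++ [off.foldl (fun a c => a * 2 + pvA_bit c) v], false, 0, 0,
          off.foldl (fun a c => a * 2 + pvA_bit c) v) cs := by
  induction off with
  | nil => intro _ _ _ hne _; exact absurd rfl hne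
  | cons c t ih =>
    intro cs dec v _ hall
    simp only [List.all_cons, Bool.and_eq_true] at hall
    have hbit : (if c == '0' then (0 : Int) else if c == '1' then 1 else 0) = pvA_bit c := by
      rcases Bool.or_eq_true_iff.mp hall.1 with h | h <;>
        (rw [beq_iff_eq] at h; subst h; simp [pvA_bit])
    cases t with
    | nil =>
      rw [List.cons_append, List.nil_append, List.foldl_cons, pvB_step_off]
      simp only [List.length_cons, List.length_nil]
      rw [if_pos (by norm_num), hbit]
      simp [List.foldl_cons]
    | cons c2 t2 =>
      rw [List.cons_append, List.foldl_cons, pvB_step_off]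
      simp only [List.length_cons]
      rw [if_neg (by push_cast; omega), hbit]
      have hrw : (((t2.length + 1 + 1 : Nat) : Int)) - 1 = (((c2 :: t2).length : Nat) : Int) := by
        simp only [List.length_cons]; push_cast; ring
      rw [hrw]
      rw [ih cs dec (v * 2 + pvA_bit c) (by simp) hall.2]
      simp [List.foldl_cons]

-- every character of takeWhile (· == '0') is '0'
theorem pv_takeWhile_all (cs : List Char) :
    (cs.takeWhile (· == '0')).all (· == '0') = true := by
  simp only [List.all_eq_true]
  intro a ha
  have := List.mem_takeWhile_imp (p := (· == '0')) ha
  simpa using this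

-- the head of dropWhile fails the predicate
theorem pv_dropWhile_head (cs : List Char) (d : Char) (r : List Char)
    (h : cs.dropWhile (· == '0') = d :: r) : (d == '0') = false := by
  have := List.dropWhile_get_zero_not (p := (· == '0')) cs (by simp [h])
  simpa [h] using this

-- a run of '0's only bumps the zero counter
theorem pvVG_prefix (zs : List Char) : ∀ (t : List Char) (z : Nat),
    zs.all (· == '0') = true → pvVG (zs ++ t) z 0 = pvVG t (z + zs.length) 0 := by
  induction zs with
  | nil => intro t z _; simp
  | cons c w ih =>
    intro t z hall
    simp only [List.all_cons, Bool.and_eq_true] at hall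
    simp only [List.cons_append, pvVG, if_pos rfl, hall.1, if_true]
    rw [ih t (z + 1) hall.2, List.length_cons]
    congr 1
    omega

-- paying off `k` owed offset bits forces the next k characters to be binary
theorem pvVG_offset : ∀ (k : Nat) (r : List Char), pvVG r 0 k = true →
    k ≤ r.length ∧ (r.take k).all (fun b => b == '0' || b == '1') = true ∧
      pvVG (r.drop k) 0 0 = true := by
  intro k
  induction k with
  | zero => intro r h; simpa using h
  | succ k ih =>
    intro r h
    cases r with
    | nil => simp [pvVG] at h
    | cons c t =>
      have hstep : pvVG (c :: t) 0 (k + 1) = ((c == '0' || c == '1') && pvVG t 0 k) := by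
        rw [pvVG.eq_def]; norm_num
      rw [hstep, Bool.and_eq_true] at h
      obtain ⟨hkle, hbin, hrec⟩ := ih t h.2
      refine ⟨by simp; omega, ?_, by simpa using hrec⟩
      simp [List.take_succ_cons, List.all_cons, h.1, hbin]

-- main induction: on well-formed suffixes, A's loop equals B's fold (any prefix-mode value)
theorem pv_main : ∀ (n : Nat) (cs : List Char), cs.length ≤ n → pvVG cs 0 0 = true →
    ∀ (dec : List Int) (v : Int),
      pvA_loop cs dec = (List.foldl pvB_step (dec, false, 0, 0, v) cs).1 := by
  intro n
  induction n with
  | zero =>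
    intro cs hlen _ dec v
    have : cs = [] := List.length_eq_zero_iff.mp (Nat.le_zero.mp hlen)
    subst this; simp [pvA_loop]
  | succ n ih =>
    intro cs hlen hval dec v
    cases hcs : cs with
    | nil => simp [pvA_loop]
    | cons c t =>
      subst hcs
      have h1 : pvVG (List.takeWhile (fun x => x == '0') (c :: t) ++
          List.dropWhile (fun x => x == '0') (c :: t)) 0 0 = true := by
        rw [List.takeWhile_append_dropWhile]; exact hval
      have hlencs := congrArg List.length
        (List.takeWhile_append_dropWhile (p := fun x => x == '0') (l := c :: t))
      cases hdr : (c :: t).dropWhile (· == '0') with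
      | nil =>
        exfalso
        rw [hdr, pvVG_prefix _ _ _ (pv_takeWhile_all (c :: t))] at h1
        rw [hdr] at hlencs
        simp [pvVG] at h1
        simp [h1] at hlencs
      | cons d r =>
        rw [hdr, pvVG_prefix _ _ _ (pv_takeWhile_all (c :: t))] at h1
        have hd0 : (d == '0') = false := pv_dropWhile_head (c :: t) d r hdr
        rw [show pvVG (d :: r) (0 + (List.takeWhile (fun x => x == '0') (c :: t)).length) 0 =
            pvVG r 0 (0 + (List.takeWhile (fun x => x == '0') (c :: t)).length) from by
          simp [pvVG, hd0]] at h1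
        rw [Nat.zero_add] at h1
        obtain ⟨hkle, hbin, hrec⟩ := pvVG_offset _ _ h1
        generalize hK : (List.takeWhile (fun x => x == '0') (c :: t)).length = k
          at hkle hbin hrec
        -- A side
        have hA : pvA_loop (c :: t) dec =
            pvA_loop (r.drop k) (dec ++ [(r.take k).foldl (fun a c => a * 2 + pvA_bit c) 1]) := by
          rw [pvA_loop]
          simp only [pvA_countZeros_eq, zero_add, hdr, hK, List.tail_cons, Int.toNat_natCast]
          rw [dif_neg (by simp)]
          rw [if_neg (by omega)]
          rw [pvA_int2_bin _ hbin]
        -- B side: decompose c :: t = takeWhile ++ d :: r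
        have hsplit : c :: t = ((c :: t).takeWhile (· == '0')) ++ (d :: r) := by
          rw [← hdr]; exact (List.takeWhile_append_dropWhile).symm
        have hB : List.foldl pvB_step (dec, false, 0, 0, v) (c :: t) =
            List.foldl pvB_step (dec, false, (k : Int), 0, v) (d :: r) := by
          conv_lhs => rw [hsplit]
          rw [pvB_prefix _ _ _ _ _ _ (pv_takeWhile_all (c :: t))]
          rw [hK]; norm_num
        -- length bookkeeping for IH
        have hlen2 : (r.drop k).length ≤ n := by
          have hle1 : (c :: t).length ≤ n + 1 := hlen
          have hle2 := List.length_dropWhile_le (· == '0') (c :: t)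
          rw [hdr] at hle2
          have hle3 : (r.drop k).length = r.length - k := List.length_drop
          simp only [List.length_cons] at hle1 hle2
          omega
        by_cases hk0 : k = 0
        · -- empty offset: terminator alone encodes 1
          subst hk0
          have hA' : pvA_loop (c :: t) dec = pvA_loop r (dec ++ [1]) := by
            simpa using hA
          rw [hA', hB, List.foldl_cons]
          rw [pvB_step_term _ _ _ _ _ hd0, if_pos (by norm_num)]
          exact ih r (by simpa using hlen2) (by simpa using hrec) (dec ++ [1]) 1
        · -- nonempty offset
          have hoffne : r.take k ≠ [] := by
            intro h
            have := congrArg List.length h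
            simp only [List.length_take, List.length_nil] at this
            omega
          have hofflen : (r.take k).length = k := by
            simp [List.length_take]; omega
          rw [hA, hB, List.foldl_cons]
          rw [pvB_step_term _ _ _ _ _ hd0, if_neg (by exact_mod_cast hk0)]
          have hrsplit : r = r.take k ++ r.drop k := (List.take_append_drop k r).symm
          conv_rhs => rw [hrsplit]
          rw [show ((k : Int)) = (((r.take k).length : Nat) : Int) by rw [hofflen]]
          rw [pvB_offset (r.take k) (r.drop k) dec 1 hoffne hbin]
          exact ih (r.drop k) hlen2 hrec _ _

-- ===== VERDICT (by name: the statement is the Claim_ definition above) =====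
theorem gamma_decode_spec : Claim_equal_gamma_decode := by
  intro stream _ hpre
  unfold Spec_gamma_decode gamma_decode gamma_decode_alt
  exact pv_main stream.toList.length stream.toList le_rfl hpre [] 0
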